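-- pv_equiv track=rewrite | github.com/fcjdgmrvwm/multipost | mp_sampler.py | compute_link_order
-- ===== SOURCE A (Python) =====
-- def compute_link_order(link):
--     link = "/" + link
--     order = 0
--     flag = 0
--     for i in link:
--         if i == '/':
--             if flag == 0 :
--                 order += 1
--                 flag = 1
--         else:
--             flag = 0
--     return order - flag + 1
-- ===== SOURCE B (Python) =====
-- def compute_link_order(link):
--     s = "/" + link
--     return 1 + sum(1 for prev, cur in zip(s, s[1:]) if prev == '/' and cur != '/')
-- ===== Notes on version B (the rewrite author's own statement) =====
-- stated objective: idiomatic
-- what changed: Replaces the mutable order/flag state machine and its final order-flag+1 correction by a stateless pairwise scan: zip adjacent characters of the slash-prefixed link and count slash-to-non-slash transitions (segment starts), plus one.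
import Mathlib
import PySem

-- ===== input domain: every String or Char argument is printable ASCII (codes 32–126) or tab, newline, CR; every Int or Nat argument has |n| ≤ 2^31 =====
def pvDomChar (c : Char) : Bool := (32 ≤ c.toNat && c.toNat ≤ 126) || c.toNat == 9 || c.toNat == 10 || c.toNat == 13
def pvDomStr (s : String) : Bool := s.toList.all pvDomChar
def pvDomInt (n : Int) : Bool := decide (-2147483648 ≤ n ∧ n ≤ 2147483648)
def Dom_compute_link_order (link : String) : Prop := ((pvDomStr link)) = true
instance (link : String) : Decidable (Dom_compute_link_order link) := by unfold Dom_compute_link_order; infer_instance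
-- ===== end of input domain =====

-- B replaces A's order/flag state machine by a stateless pairwise zip counting
-- slash-to-non-slash transitions (idiomatic; same O(n) cost).

-- ===== PORT A =====
-- the for-loop over link's characters, state (order, flag), branches in source order
def computeLinkOrderLoop (cs : List Char) (order flag : Int) : Int × Int :=
  match cs with
  | [] => (order, flag)
  | i :: rest =>
    if i = '/' then
      if flag = 0 then computeLinkOrderLoop rest (order + 1) 1
      else computeLinkOrderLoop rest order flag
    else computeLinkOrderLoop rest order 0

def compute_link_order (link : String) : Int :=
  let link' := "/" ++ link        -- link = "/" + link
  let r := computeLinkOrderLoop link'.toList 0 0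
  r.1 - r.2 + 1

-- ===== PORT B =====
def compute_link_order_alt (link : String) : Int :=
  let s := ("/" ++ link).toList
  -- sum(1 for prev, cur in zip(s, s[1:]) if prev == '/' and cur != '/')
  1 + ((s.zip s.tail).countP (fun pc => pc.1 == '/' && !(pc.2 == '/')) : Int)

-- ===== PRECONDITION & SPEC =====
def Spec_compute_link_order (link : String) (out : Int) : Prop := out = compute_link_order_alt link
instance (link : String) (out : Int) : Decidable (Spec_compute_link_order link out) := by unfold Spec_compute_link_order; infer_instance

-- ===== CLAIM (what is proved, stated in full; the proofs are below) =====
def Claim_equal_compute_link_order : Prop := ∀ (link : String), Dom_compute_link_order link → Spec_compute_link_order link (compute_link_order link)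

-- ===== LEMMAS AND PROOFS =====

-- number of segment starts in cs, given whether the previous character was '/'
def segStarts (prevSlash : Bool) (cs : List Char) : Int :=
  match cs with
  | [] => 0
  | c :: rest =>
    if c = '/' then segStarts true rest
    else (if prevSlash then 1 else 0) + segStarts false rest

theorem loop_diff (cs : List Char) : ∀ (order flag : Int), flag = 0 ∨ flag = 1 →
    (computeLinkOrderLoop cs order flag).1 - (computeLinkOrderLoop cs order flag).2
      = order - flag + segStarts (flag == 1) cs := by
  induction cs with
  | nil => intro order flag _; simp [computeLinkOrderLoop, segStarts]
  | cons c rest ih =>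
    intro order flag hf
    by_cases hc : c = '/'
    · rcases hf with h | h <;>
        simp [computeLinkOrderLoop, segStarts, hc, h, ih _ 1 (Or.inr rfl)] <;> ring
    · rcases hf with h | h <;>
        simp [computeLinkOrderLoop, segStarts, hc, h, ih _ 0 (Or.inl rfl)] <;> ring

theorem zip_count_eq_segStarts (cs : List Char) : ∀ (p : Char),
    ((((p :: cs).zip cs).countP (fun pc => pc.1 == '/' && !(pc.2 == '/'))) : Int)
      = segStarts (p == '/') cs := by
  induction cs with
  | nil => intro p; simp [segStarts]
  | cons c rest ih =>
    intro p
    have h := ih c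
    by_cases hc : c = '/'
    · subst hc
      rw [show ('/' == '/') = true from rfl] at h
      by_cases hp : p = '/' <;>
        simp [List.countP_cons, segStarts, hp, h]
    · rw [show (c == '/') = false from by simp [hc]] at h
      by_cases hp : p = '/' <;>
        simp [List.countP_cons, segStarts, hp, hc, h] <;> push_cast <;> ring

-- ===== VERDICT (by name: the statement is the Claim_ definition above) =====
theorem compute_link_order_spec : Claim_equal_compute_link_order := by
  intro link _
  unfold Spec_compute_link_order compute_link_order compute_link_order_alt
  have hs : ("/" ++ link).toList = '/' :: link.toList := by
    simp [String.toList_append]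
  simp only [hs]
  rw [show computeLinkOrderLoop ('/' :: link.toList) 0 0
        = computeLinkOrderLoop link.toList 1 1 by simp [computeLinkOrderLoop]]
  rw [loop_diff link.toList 1 1 (Or.inr rfl)]
  simp [List.tail, zip_count_eq_segStarts link.toList '/']
  ring
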